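-- pv_equiv track=rewrite | github.com/Tommination/IX1500 | main.py | produce_basic_path
-- ===== SOURCE A (Python) =====
-- def calculate_number_Ls(start_point,end_point): #Calculates the number of L-moves needed to move between two points
--     total_moves = end_point[0] - start_point[0]  # total number of moves betwwen two points (x-value difference)
--     vertical_movement = end_point[1] - start_point[1]  # (y-value difference, needed to figure out how many moves of which kind)
--     no_Ls = int(((total_moves + vertical_movement) / 2) - vertical_movement)  # calculates number of L-moves given x and y differences.
--     return no_Ls,total_moves
--
-- def produce_basic_path(start_point,end_point): # Creates a string for a path between two points, all L-moves and then all U_moves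
--     no_Ls = calculate_number_Ls(start_point,end_point)[0]  # number of L-moves
--     total_moves = calculate_number_Ls(start_point,end_point)[1]  # total number of neede moves
--     basic_path_string = ''
--     for i in range(0,total_moves):  # Fills out a string given an amount of moves and amount that should be L-type.
--         if i < no_Ls:
--             basic_path_string = basic_path_string + 'L'
--         else:
--             basic_path_string = basic_path_string + 'U' #if the number of L-moves has been reached the rest are U.
--     return basic_path_string
-- ===== SOURCE B (Python) =====
-- def produce_basic_path(start_point, end_point):
--     # Closed-form construction: k L-moves then the remaining U-moves, no per-character loop.
--     tm = end_point[0] - start_point[0]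
--     vm = end_point[1] - start_point[1]
--     k = max(0, min((tm - vm) // 2, tm))
--     return 'L' * k + 'U' * (tm - k)
-- ===== Notes on version B (the rewrite author's own statement) =====
-- stated objective: simpler
-- what changed: Replaces the per-index accumulation loop (and the duplicated helper call) with a closed-form construction 'L'*k + 'U'*(tm-k), where k clamps the L-count into [0, tm].
import Mathlib
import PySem

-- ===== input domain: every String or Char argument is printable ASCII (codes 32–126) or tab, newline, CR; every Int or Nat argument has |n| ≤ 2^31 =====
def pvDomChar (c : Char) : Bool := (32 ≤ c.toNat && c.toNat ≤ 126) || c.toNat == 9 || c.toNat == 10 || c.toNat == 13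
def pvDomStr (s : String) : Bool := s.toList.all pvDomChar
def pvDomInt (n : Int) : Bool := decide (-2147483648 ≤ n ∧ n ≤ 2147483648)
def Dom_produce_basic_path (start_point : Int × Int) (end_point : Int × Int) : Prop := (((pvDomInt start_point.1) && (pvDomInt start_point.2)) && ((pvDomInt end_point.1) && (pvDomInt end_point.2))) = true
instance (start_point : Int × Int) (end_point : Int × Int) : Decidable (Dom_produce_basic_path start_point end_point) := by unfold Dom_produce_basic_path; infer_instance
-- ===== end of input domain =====

-- B replaces A's per-index loop with a closed-form string 'L'*k ++ 'U'*(tm-k), k the clamped L-count (objective: simpler).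

-- ===== PORT A =====
def produce_basic_path (start_point : Int × Int) (end_point : Int × Int) : String :=
  let total_moves := end_point.1 - start_point.1
  let vertical_movement := end_point.2 - start_point.2
  -- int(((tm+vm)/2) - vm): on |n| ≤ 2^31 the float arithmetic is exact (results are
  -- half-integers below 2^53) and int() truncates toward zero, so this is exactly the
  -- toward-zero integer division of (tm+vm) - 2*vm by 2.
  let no_Ls := Int.tdiv ((total_moves + vertical_movement) - 2 * vertical_movement) 2
  String.mk ((PySem.List.pyRange 0 total_moves 1).foldl
    (fun acc i => if i < no_Ls then acc ++ ['L'] else acc ++ ['U']) [])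

-- ===== PORT B =====
def produce_basic_path_alt (start_point : Int × Int) (end_point : Int × Int) : String :=
  let tm := end_point.1 - start_point.1
  let vm := end_point.2 - start_point.2
  let k := max 0 (min (PySem.Int.floordiv (tm - vm) 2) tm)
  String.mk (List.replicate k.toNat 'L' ++ List.replicate (tm - k).toNat 'U')

-- ===== PRECONDITION & SPEC =====
def Spec_produce_basic_path (start_point : Int × Int) (end_point : Int × Int) (out : String) : Prop := out = produce_basic_path_alt start_point end_point
instance (start_point : Int × Int) (end_point : Int × Int) (out : String) : Decidable (Spec_produce_basic_path start_point end_point out) := by unfold Spec_produce_basic_path; infer_instance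

-- ===== CLAIM (what is proved, stated in full; the proofs are below) =====
def Claim_equal_produce_basic_path : Prop := ∀ (start_point : Int × Int) (end_point : Int × Int), Dom_produce_basic_path start_point end_point → Spec_produce_basic_path start_point end_point (produce_basic_path start_point end_point)

-- ===== LEMMAS AND PROOFS =====

-- A's accumulation loop appends one character per index.
theorem foldl_LU (c : Int) (l : List Int) (acc : List Char) :
    l.foldl (fun acc i => if i < c then acc ++ ['L'] else acc ++ ['U']) acc
      = acc ++ l.map (fun i => if i < c then 'L' else 'U') := by
  induction l generalizing acc with
  | nil => simp
  | cons x t ih => simp only [List.foldl_cons, List.map_cons]; split <;> simp [ih]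

-- The characterisation of A's string: L's for indices below c, then U's.
theorem map_LU_range (c : Int) (n : Nat) :
    (List.range n).map (fun (j : Nat) => if (j : Int) < c then 'L' else 'U')
      = List.replicate (min c.toNat n) 'L' ++ List.replicate (n - min c.toNat n) 'U' := by
  induction n with
  | zero => simp
  | succ n ih =>
    rw [List.range_succ, List.map_append, ih]
    by_cases h : (n : Int) < c
    · have h2 : min c.toNat n = n := by omega
      simp [h, h2, List.replicate_succ' (n := n)]
    · have h2 : min c.toNat (n + 1) = min c.toNat n := by omega
      have h3 : n + 1 - min c.toNat n = (n - min c.toNat n) + 1 := by omega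
      simp only [List.map_cons, List.map_nil, h, if_false, h2, h3,
        List.replicate_succ' (n := n - min c.toNat n), List.append_assoc]

-- ===== VERDICT (by name: the statement is the Claim_ definition above) =====
theorem produce_basic_path_spec : Claim_equal_produce_basic_path := by
  intro sp ep _
  unfold Spec_produce_basic_path produce_basic_path produce_basic_path_alt
  simp only [PySem.List.pyRange_one, foldl_LU, List.map_map, List.nil_append, Int.sub_zero,
    Function.comp_def, Int.zero_add, PySem.Int.floordiv]
  set tm := ep.1 - sp.1 with htm
  set vm := ep.2 - sp.2 with hvm
  set d : Int := (tm + vm) - 2 * vm with hd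
  have hd' : tm - vm = d := by omega
  rw [hd', map_LU_range]
  have ht : d.tdiv 2 = d / 2 + if 0 ≤ d ∨ 2 ∣ d then 0 else 1 := by
    rw [Int.tdiv_eq_ediv]; split_ifs <;> simp [Int.sign]
  have hf : d.fdiv 2 = d / 2 := by rw [Int.fdiv_eq_ediv]; norm_num
  have hcount : min (d.tdiv 2).toNat tm.toNat = (max 0 (min (d.fdiv 2) tm)).toNat := by
    rw [hf]; split_ifs at ht <;> omega
  have hrest : tm.toNat - (max 0 (min (d.fdiv 2) tm)).toNat
      = (tm - max 0 (min (d.fdiv 2) tm)).toNat := by omega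
  rw [hcount, hrest]
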